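-- pv_equiv track=rewrite | github.com/dantetemplar/competitive-programming | Codeforces - Codeforces Round 1049 (Div. 2)/C_Ультимативное_значение.py | solve
-- ===== SOURCE A (Python) =====
-- def solve(n: int, A: list[int]) -> int:
--     f = 0
--     sign = 1
--     for a in A:
--         f += sign * a
--         sign = -sign
--
--     INF = 10**30
--     max_change = 0
--
--     # Earliest index per parity for same-parity case (maximize r - l)
--     first_idx = {0: None, 1: None}  # parity -> earliest index (1-based)
--
--     # Running minima for cross-parity cases
--     # For l odd, r even: (r + 2A[r]) - (l + 2A[l]) -> keep min (l + 2A[l]) over odd l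
--     min_odd_lp2a = INF
--     # For l even, r odd: (r - 2A[r]) - (l - 2A[l]) -> keep min (l - 2A[l]) over even l
--     min_even_lm2a = INF
--
--     for r in range(1, n + 1):
--         ar = A[r - 1]
--         p = r % 2
--
--         # same parity: r - l
--         if first_idx[p] is not None:
--             if r - first_idx[p] > max_change:
--                 max_change = r - first_idx[p]
--
--         # cross parity:
--         if p == 0:  # r even: l must be odd -> (r + 2A[r]) - min(l + 2A[l]) over odd l
--             if min_odd_lp2a < INF:
--                 cand = (r + 2 * ar) - min_odd_lp2a
--                 if cand > max_change:
--                     max_change = cand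
--         else:  # p == 1, r odd: l must be even -> (r - 2A[r]) - min(l - 2A[l]) over even l
--             if min_even_lm2a < INF:
--                 cand = (r - 2 * ar) - min_even_lm2a
--                 if cand > max_change:
--                     max_change = cand
--
--         # update structures with current r for future positions
--         if first_idx[p] is None:
--             first_idx[p] = r  # earliest index of this parity
--
--         if p == 1:
--             # r is odd -> contributes to odd l pool
--             val = r + 2 * ar
--             if val < min_odd_lp2a:
--                 min_odd_lp2a = val
--         else:
--             # r is even -> contributes to even l pool
--             val = r - 2 * ar
--             if val < min_even_lm2a:
--                 min_even_lm2a = val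
--
--     if max_change > 0:
--         f += max_change
--     return f
-- ===== SOURCE B (Python) =====
-- def _cand(A, l, r):
--     # change in f when the element pair (l, r) is used for the move (delta formula)
--     al = A[l - 1]
--     ar = A[r - 1]
--     if l % 2 == r % 2:
--         return r - l
--     if l % 2 == 1:
--         return (r + 2 * ar) - (l + 2 * al)
--     return (r - 2 * ar) - (l - 2 * al)
--
--
-- def solve(n, A):
--     best = 0
--     for r in range(1, n + 1):
--         for l in range(1, r):
--             best = max(best, _cand(A, l, r))
--     f = sum(a if i % 2 == 0 else -a for i, a in enumerate(A))
--     return f + best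
-- ===== Notes on version B (the rewrite author's own statement) =====
-- stated objective: simpler
-- what changed: Replaces A's single-pass bookkeeping (earliest index per parity plus two running minima with an INF sentinel) by a direct brute-force enumeration of all pairs (l, r) with the per-pair delta formula, and computes the alternating sum by index parity instead of a sign-flipping accumulator.
import Mathlib
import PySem

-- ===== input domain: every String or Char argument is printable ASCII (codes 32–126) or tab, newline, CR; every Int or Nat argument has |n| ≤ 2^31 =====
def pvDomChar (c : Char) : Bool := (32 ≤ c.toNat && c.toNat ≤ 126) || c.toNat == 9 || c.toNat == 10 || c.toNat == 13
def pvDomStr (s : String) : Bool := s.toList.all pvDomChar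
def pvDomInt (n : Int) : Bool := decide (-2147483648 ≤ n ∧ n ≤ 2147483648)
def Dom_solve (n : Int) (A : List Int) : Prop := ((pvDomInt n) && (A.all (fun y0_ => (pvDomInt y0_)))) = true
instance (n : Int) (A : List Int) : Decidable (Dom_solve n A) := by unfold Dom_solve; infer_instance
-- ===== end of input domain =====

-- B replaces A's one-pass running-minima/earliest-index bookkeeping by a plain brute-force
-- enumeration of all pairs (l, r) with the per-pair delta formula (simpler, not faster).

-- ===== PORT A =====
def pvINF : Int := 10 ^ 30

-- one iteration of A's main loop; state = (first_idx[0], first_idx[1], min_odd_lp2a, min_even_lm2a, max_change)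
def solveStep (A : List Int) (s : Option Int × Option Int × Int × Int × Int) (r : Int) :
    Option Int × Option Int × Int × Int × Int :=
  let ar := PySem.List.pyGetD A (r - 1) 0
  let p := PySem.Int.mod r 2
  -- same parity: r - first_idx[p]
  let mc1 := (if p == 0 then s.1 else s.2.1).elim s.2.2.2.2
    (fun l => if r - l > s.2.2.2.2 then r - l else s.2.2.2.2)
  -- cross parity
  let mc2 :=
    if p == 0 then
      (if s.2.2.1 < pvINF then (if (r + 2 * ar) - s.2.2.1 > mc1 then (r + 2 * ar) - s.2.2.1 else mc1) else mc1)
    else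
      (if s.2.2.2.1 < pvINF then (if (r - 2 * ar) - s.2.2.2.1 > mc1 then (r - 2 * ar) - s.2.2.2.1 else mc1) else mc1)
  -- update earliest index of parity p
  let f0 := if p == 0 && s.1 == none then some r else s.1
  let f1 := if p == 1 && s.2.1 == none then some r else s.2.1
  -- update running minima
  let mo := if p == 1 then (if r + 2 * ar < s.2.2.1 then r + 2 * ar else s.2.2.1) else s.2.2.1
  let me := if p == 1 then s.2.2.2.1 else (if r - 2 * ar < s.2.2.2.1 then r - 2 * ar else s.2.2.2.1)
  (f0, f1, mo, me, mc2)

def solve (n : Int) (A : List Int) : Int :=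
  let f := (A.foldl (fun (fs : Int × Int) a => (fs.1 + fs.2 * a, -fs.2)) (0, 1)).1
  let st := (PySem.List.pyRange 1 (n + 1) 1).foldl (solveStep A) (none, none, pvINF, pvINF, 0)
  if st.2.2.2.2 > 0 then f + st.2.2.2.2 else f

-- ===== PORT B =====
-- _cand(A, l, r) from Source B
def candB (A : List Int) (l r : Int) : Int :=
  let al := PySem.List.pyGetD A (l - 1) 0
  let ar := PySem.List.pyGetD A (r - 1) 0
  if PySem.Int.mod l 2 == PySem.Int.mod r 2 then r - l
  else if PySem.Int.mod l 2 == 1 then (r + 2 * ar) - (l + 2 * al)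
  else (r - 2 * ar) - (l - 2 * al)

def solve_alt (n : Int) (A : List Int) : Int :=
  let best := (PySem.List.pyRange 1 (n + 1) 1).foldl
    (fun best r => (PySem.List.pyRange 1 r 1).foldl (fun b l => max b (candB A l r)) best) 0
  let f := (PySem.List.enumerate A 0).foldl
    (fun acc ia => acc + (if PySem.Int.mod ia.1 2 == 0 then ia.2 else -ia.2)) 0
  f + best

-- ===== PRECONDITION & SPEC =====
-- Pre_ excludes exactly n > len(A), where Python A raises IndexError at A[r-1].
def Pre_solve (n : Int) (A : List Int) : Prop := n ≤ (A.length : Int)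
instance (n : Int) (A : List Int) : Decidable (Pre_solve n A) := by unfold Pre_solve; infer_instance
def pvWitness_solve : Int × List Int := (3, [1, -2, 3])

def Spec_solve (n : Int) (A : List Int) (out : Int) : Prop := out = solve_alt n A
instance (n : Int) (A : List Int) (out : Int) : Decidable (Spec_solve n A out) := by unfold Spec_solve; infer_instance

-- ===== CLAIM (what is proved, stated in full; the proofs are below) =====
def Claim_equal_solve : Prop := ∀ (n : Int) (A : List Int), Dom_solve n A → Pre_solve n A → Spec_solve n A (solve n A)

-- ===== LEMMAS AND PROOFS =====

theorem pyGetD_pred (A : List Int) (i : Int) (d : Int) (P : Int → Prop) (h : ∀ a ∈ A, P a) (hd : P d) :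
    P (PySem.List.pyGetD A i d) := by
  by_cases hr : PySem.Raise.InRange A.length i
  · exact h _ (PySem.List.pyGetD_mem A d hr)
  · have e : PySem.List.pyGetD A i d = d := by
      simp [PySem.List.pyGetD, PySem.List.pyGet?, PySem.List.pyIdx?, PySem.Raise.InRange] at hr ⊢
      split_ifs with h1 h2 h3 <;> simp <;> omega
    rw [e]; exact hd

-- recursive alternating sum (proof-side characterization of both f computations)
def altS : List Int → Int
  | [] => 0
  | a :: t => a - altS t

theorem foldA_fst (xs : List Int) : ∀ (acc s : Int),
    (xs.foldl (fun (fs : Int × Int) a => (fs.1 + fs.2 * a, -fs.2)) (acc, s)).1 = acc + s * altS xs := by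
  induction xs with
  | nil => intro acc s; simp [altS]
  | cons a t ih => intro acc s; simp only [List.foldl_cons, altS, ih]; ring

theorem foldB_enum (xs : List Int) : ∀ (s0 : Nat) (acc : Int),
    ((PySem.List.enumerate xs (s0 : Int)).foldl
      (fun acc ia => acc + (if PySem.Int.mod ia.1 2 == 0 then ia.2 else -ia.2)) acc)
    = acc + (if s0 % 2 = 0 then altS xs else -altS xs) := by
  induction xs with
  | nil => intro s0 acc; simp [PySem.List.enumerate, altS]
  | cons a t ih =>
      intro s0 acc
      rw [PySem.List.enumerate_cons, List.foldl_cons,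
        show ((s0 : Int) + 1) = ((s0 + 1 : Nat) : Int) by push_cast; ring, ih]
      have hm : PySem.Int.mod (s0 : Int) 2 = ((s0 % 2 : Nat) : Int) := by
        exact_mod_cast PySem.Int.mod_natCast s0 2
      rcases Nat.mod_two_eq_zero_or_one s0 with h | h
      · have hsucc : (s0 + 1) % 2 = 1 := by omega
        simp only [altS, hm, h, hsucc, beq_iff_eq]
        norm_num
        ring
      · have hsucc : (s0 + 1) % 2 = 0 := by omega
        simp only [altS, hm, h, hsucc, beq_iff_eq]
        norm_num
        ring

-- state after processing r = 1..k of A's loop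
def stateN (A : List Int) : Nat → Option Int × Option Int × Int × Int × Int
  | 0 => (none, none, pvINF, pvINF, 0)
  | k + 1 => solveStep A (stateN A k) ((k : Int) + 1)

theorem fold_state (A : List Int) (m : Nat) :
    (PySem.List.pyRange 1 ((m : Int) + 1) 1).foldl (solveStep A) (none, none, pvINF, pvINF, 0)
      = stateN A m := by
  induction m with
  | zero => rw [PySem.List.pyRange_one_eq_nil (by omega)]; rfl
  | succ k ih =>
      rw [show ((k + 1 : Nat) : Int) + 1 = ((k : Int) + 1) + 1 by push_cast; ring,
        PySem.List.pyRange_one_succ_right (by omega), List.foldl_append, ih]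
      rfl

-- B's best after processing r = 1..k
def bestN (A : List Int) : Nat → Int
  | 0 => 0
  | k + 1 => (PySem.List.pyRange 1 ((k : Int) + 1) 1).foldl
      (fun b l => max b (candB A l ((k : Int) + 1))) (bestN A k)

theorem fold_best (A : List Int) (m : Nat) :
    (PySem.List.pyRange 1 ((m : Int) + 1) 1).foldl
      (fun best r => (PySem.List.pyRange 1 r 1).foldl (fun b l => max b (candB A l r)) best) 0
      = bestN A m := by
  induction m with
  | zero => rw [PySem.List.pyRange_one_eq_nil (by omega)]; rfl
  | succ k ih =>
      rw [show ((k + 1 : Nat) : Int) + 1 = ((k : Int) + 1) + 1 by push_cast; ring,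
        PySem.List.pyRange_one_succ_right (by omega), List.foldl_append, ih]
      rfl

theorem bestN_nonneg (A : List Int) : ∀ k, 0 ≤ bestN A k := by
  intro k
  induction k with
  | zero => simp [bestN]
  | succ k ih =>
      calc (0:Int) ≤ bestN A k := ih
        _ ≤ _ := (PySem.List.le_foldl_max_int _ (fun l => candB A l ((k : Int) + 1)) (bestN A k)).1

-- A's max_change update at step r, from the state after r-1 steps, as a function of the incoming mc
def AUpd (A : List Int) (r : Int) (j : Nat) (b : Int) : Int :=
  let s := stateN A j
  let ar := PySem.List.pyGetD A (r - 1) 0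
  let p := PySem.Int.mod r 2
  let mc1 := (if p == 0 then s.1 else s.2.1).elim b
    (fun l => if r - l > b then r - l else b)
  if p == 0 then
    (if s.2.2.1 < pvINF then (if (r + 2 * ar) - s.2.2.1 > mc1 then (r + 2 * ar) - s.2.2.1 else mc1) else mc1)
  else
    (if s.2.2.2.1 < pvINF then (if (r - 2 * ar) - s.2.2.2.1 > mc1 then (r - 2 * ar) - s.2.2.2.1 else mc1) else mc1)

theorem stateN_mc_succ (A : List Int) (k : Nat) :
    (stateN A (k + 1)).2.2.2.2 = AUpd A ((k : Int) + 1) k ((stateN A k).2.2.2.2) := rfl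

theorem mod_cast_succ (k : Nat) : PySem.Int.mod ((k : Int) + 1) 2 = (((k + 1) % 2 : Nat) : Int) := by
  rw [show ((k : Int) + 1) = ((k + 1 : Nat) : Int) by push_cast; ring]
  exact_mod_cast PySem.Int.mod_natCast (k + 1) 2

theorem stateN_f0 (A : List Int) : ∀ k, (stateN A k).1 = if 2 ≤ k then some (2 : Int) else none := by
  intro k
  induction k with
  | zero => simp [stateN]
  | succ k ih =>
      rcases Nat.mod_two_eq_zero_or_one (k + 1) with h | h <;>
        · simp only [stateN, solveStep, mod_cast_succ, h, ih, Nat.cast_zero, Nat.cast_one]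
          try split_ifs
          all_goals (first | rfl | (exfalso; omega) | (simp; omega) | simp_all)

theorem stateN_f1 (A : List Int) : ∀ k, (stateN A k).2.1 = if 1 ≤ k then some (1 : Int) else none := by
  intro k
  induction k with
  | zero => simp [stateN]
  | succ k ih =>
      rcases Nat.mod_two_eq_zero_or_one (k + 1) with h | h <;>
        · simp only [stateN, solveStep, mod_cast_succ, h, ih, Nat.cast_zero, Nat.cast_one]
          try split_ifs
          all_goals (first | rfl | (exfalso; omega) | (simp; omega) | simp_all)

theorem stateN_mo_spec (A : List Int) (hA : ∀ a ∈ A, -2^31 ≤ a ∧ a ≤ 2^31) :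
    ∀ (k : Nat), (k : Int) ≤ 2^31 → ((stateN A k).2.2.1 < pvINF ↔ 1 ≤ k) := by
  intro k
  induction k with
  | zero => intro _; simp [stateN]
  | succ k ih =>
      intro hk
      push_cast at hk
      have hk' : (k : Int) ≤ 2^31 := by omega
      have har := pyGetD_pred A ((k : Int) + 1 - 1) 0 (fun a => -2^31 ≤ a ∧ a ≤ 2^31) hA (by norm_num)
      have hih := ih hk'
      rcases Nat.mod_two_eq_zero_or_one (k + 1) with h | h <;>
        · simp only [stateN, solveStep, mod_cast_succ, h, Nat.cast_zero, Nat.cast_one]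
          norm_num [pvINF] at har hih hk ⊢
          try split_ifs
          all_goals omega

theorem stateN_me_spec (A : List Int) (hA : ∀ a ∈ A, -2^31 ≤ a ∧ a ≤ 2^31) :
    ∀ (k : Nat), (k : Int) ≤ 2^31 → ((stateN A k).2.2.2.1 < pvINF ↔ 2 ≤ k) := by
  intro k
  induction k with
  | zero => intro _; simp [stateN]
  | succ k ih =>
      intro hk
      push_cast at hk
      have hk' : (k : Int) ≤ 2^31 := by omega
      have har := pyGetD_pred A ((k : Int) + 1 - 1) 0 (fun a => -2^31 ≤ a ∧ a ≤ 2^31) hA (by norm_num)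
      have hih := ih hk'
      rcases Nat.mod_two_eq_zero_or_one (k + 1) with h | h <;>
        · simp only [stateN, solveStep, mod_cast_succ, h, Nat.cast_zero, Nat.cast_one]
          norm_num [pvINF] at har hih hk ⊢
          try split_ifs
          all_goals omega

set_option maxHeartbeats 4000000 in
theorem inner_fold (A : List Int) (hA : ∀ a ∈ A, -2^31 ≤ a ∧ a ≤ 2^31) (r : Nat) (hr1 : 1 ≤ r)
    (_hr2 : (r : Int) ≤ 2^31 + 1) :
    ∀ (j : Nat), (j : Int) ≤ 2^31 → ∀ b : Int,
      (PySem.List.pyRange 1 ((j : Int) + 1) 1).foldl (fun b l => max b (candB A l (r : Int))) b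
        = AUpd A (r : Int) j b := by
  intro j
  induction j with
  | zero =>
      intro _ b
      rw [PySem.List.pyRange_one_eq_nil (by omega)]
      simp [AUpd, stateN]
  | succ j ih =>
      intro hj b
      push_cast at hj
      have hj' : (j : Int) ≤ 2^31 := by omega
      rw [show ((j + 1 : Nat) : Int) + 1 = ((j : Int) + 1) + 1 by push_cast; ring,
        PySem.List.pyRange_one_succ_right (by omega), List.foldl_append, List.foldl_cons,
        List.foldl_nil, ih (by omega) b]
      have hmr : PySem.Int.mod (r : Int) 2 = ((r % 2 : Nat) : Int) := by
        exact_mod_cast PySem.Int.mod_natCast r 2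
      have hmo := stateN_mo_spec A hA j hj'
      have hme := stateN_me_spec A hA j hj'
      have ha1 := pyGetD_pred A ((j : Int) + 1 - 1) 0 (fun a => -2^31 ≤ a ∧ a ≤ 2^31) hA (by norm_num)
      have ha2 := pyGetD_pred A ((r : Int) - 1) 0 (fun a => -2^31 ≤ a ∧ a ≤ 2^31) hA (by norm_num)
      rcases Nat.mod_two_eq_zero_or_one r with hr0 | hr0 <;>
        rcases Nat.mod_two_eq_zero_or_one (j + 1) with hj0 | hj0 <;>
        by_cases hj2 : 2 ≤ j <;> by_cases hj1 : 1 ≤ j <;>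
        · simp only [AUpd, candB, stateN, solveStep, stateN_f0, stateN_f1, mod_cast_succ, hmr,
            hr0, hj0, hj2, hj1, if_true, if_false,
            Option.elim_none, Option.elim_some, Nat.cast_zero, Nat.cast_one]
          norm_num [pvINF] at hmo hme ha1 ha2 hj ⊢
          try split_ifs
          all_goals omega

theorem mc_eq_best (A : List Int) (hA : ∀ a ∈ A, -2^31 ≤ a ∧ a ≤ 2^31) :
    ∀ (k : Nat), (k : Int) ≤ 2^31 → (stateN A k).2.2.2.2 = bestN A k := by
  intro k
  induction k with
  | zero => intro _; rfl
  | succ k ih =>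
      intro hk
      have hk' : (k : Int) ≤ 2^31 := by push_cast at hk ⊢; omega
      rw [stateN_mc_succ, ih hk', bestN]
      have h := inner_fold A hA (k + 1) (by omega) (by push_cast at hk ⊢; omega) k hk' (bestN A k)
      push_cast at h ⊢
      exact h.symm

-- ===== VERDICT (by name: the statement is the Claim_ definition above) =====
theorem solve_spec : Claim_equal_solve := by
  intro n A hDom hPre
  simp only [Spec_solve, solve, solve_alt]
  have hA : ∀ a ∈ A, -2^31 ≤ a ∧ a ≤ 2^31 := by
    intro a ha
    unfold Dom_solve at hDom
    simp [pvDomInt, List.all_eq_true] at hDom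
    have := hDom.2 a ha
    omega
  have hf : (A.foldl (fun (fs : Int × Int) a => (fs.1 + fs.2 * a, -fs.2)) (0, 1)).1
      = (PySem.List.enumerate A 0).foldl
          (fun acc ia => acc + (if PySem.Int.mod ia.1 2 == 0 then ia.2 else -ia.2)) 0 := by
    have h1 := foldA_fst A 0 1
    have h2 := foldB_enum A 0 0
    rw [show ((0 : Nat) : Int) = 0 from rfl] at h2
    rw [h1, h2]
    norm_num
  by_cases hn : 0 ≤ n
  · obtain ⟨m, hm⟩ : ∃ m : Nat, n = (m : Int) := ⟨n.toNat, by omega⟩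
    have hmb : (m : Int) ≤ 2^31 := by
      unfold Dom_solve at hDom
      simp [pvDomInt] at hDom
      omega
    subst hm
    rw [fold_state, fold_best, mc_eq_best A hA m hmb, ← hf]
    have := bestN_nonneg A m
    split_ifs with h <;> omega
  · have he : PySem.List.pyRange 1 (n + 1) 1 = [] := PySem.List.pyRange_one_eq_nil (by omega)
    rw [he]
    simp only [List.foldl_nil, ← hf]
    norm_num
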